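-- pv_equiv track=rewrite | github.com/bestchayapol/DishDive | llm_processing/utils.py | has_unterminated_string
-- ===== SOURCE A (Python) =====
-- def has_unterminated_string(json_str: str) -> bool:
--     count = 0
--     escaped = False
--     for c in json_str:
--         if c == '\\' and not escaped:
--             escaped = True
--         elif c == '"' and not escaped:
--             count += 1
--         else:
--             escaped = False
--     return count % 2 != 0
-- ===== SOURCE B (Python) =====
-- def has_unterminated_string(json_str: str) -> bool:
--     # Split on backslash: each separator escapes the character right after it.
--     parts = json_str.split('\\')
--     total = parts[0].count('"')
--     i = 1
--     while i < len(parts):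
--         seg = parts[i]
--         if seg:
--             # the backslash before this segment escapes seg[0]
--             total += seg[1:].count('"')
--             i += 1
--         else:
--             # empty segment: the backslash escapes the following backslash,
--             # so the segment after it (if any) counts in full
--             if i + 1 < len(parts):
--                 total += parts[i + 1].count('"')
--             i += 2
--     return total % 2 != 0
-- ===== Notes on version B (the rewrite author's own statement) =====
-- stated objective: faster
-- what changed: Replaces the per-character escape-flag state machine with a split on backslash: each separator escapes the next character, so B sums the quote count of each segment minus its (escaped) first character, skipping one segment after an empty one, which marks an escaped backslash.
import Mathlib
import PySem

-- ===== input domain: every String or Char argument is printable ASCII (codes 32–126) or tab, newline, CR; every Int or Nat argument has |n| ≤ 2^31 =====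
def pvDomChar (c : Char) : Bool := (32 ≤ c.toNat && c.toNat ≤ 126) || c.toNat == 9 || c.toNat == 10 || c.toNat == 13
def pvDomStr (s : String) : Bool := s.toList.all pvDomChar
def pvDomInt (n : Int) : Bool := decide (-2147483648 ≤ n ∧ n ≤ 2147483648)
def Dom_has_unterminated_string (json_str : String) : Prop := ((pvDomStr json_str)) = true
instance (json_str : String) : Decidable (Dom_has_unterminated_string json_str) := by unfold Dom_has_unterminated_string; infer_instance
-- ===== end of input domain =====

-- B replaces A's per-character escape-flag state machine by splitting the string on backslashes
-- and summing quote counts per segment (the char after each backslash is escaped); different decomposition; measurably faster (C-level split/count vs a Python char loop).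


-- ===== PORT A =====
-- the for-loop over the characters, state = (count, escaped)
def hus_loopA : List Char → Int → Bool → Int
  | [], count, _ => count
  | c :: rest, count, escaped =>
    if c = '\\' ∧ ¬(escaped = true) then hus_loopA rest count true
    else if c = '"' ∧ ¬(escaped = true) then hus_loopA rest (count + 1) escaped
    else hus_loopA rest count false

def has_unterminated_string (json_str : String) : Bool :=
  ¬(hus_loopA json_str.toList 0 false % 2 = 0)

-- ===== PORT B =====
-- the while loop over parts[1:], advancing by one segment (nonempty: its first char is escaped,
-- count seg[1:]) or by two segments (empty: the backslash escaped the next backslash, so the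
-- next segment counts in full)
def hus_segLoop : List (List Char) → Int
  | [] => 0
  | seg :: rest =>
    if seg ≠ [] then
      (PySem.Chars.count (PySem.List.slice seg (some 1) none) ['"'] : Int) + hus_segLoop rest
    else
      match rest with
      | [] => 0
      | nxt :: rest' => (PySem.Chars.count nxt ['"'] : Int) + hus_segLoop rest'

def has_unterminated_string_alt (json_str : String) : Bool :=
  match List.splitOn '\\' json_str.toList with   -- json_str.split('\\')
  | [] => false                                  -- unreachable: split always yields at least one part
  | p0 :: rest =>
      ¬(((PySem.Chars.count p0 ['"'] : Int) + hus_segLoop rest) % 2 = 0)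

-- ===== PRECONDITION & SPEC =====
def Spec_has_unterminated_string (json_str : String) (out : Bool) : Prop := out = has_unterminated_string_alt json_str
instance (json_str : String) (out : Bool) : Decidable (Spec_has_unterminated_string json_str out) := by unfold Spec_has_unterminated_string; infer_instance

-- ===== CLAIM (what is proved, stated in full; the proofs are below) =====
def Claim_equal_has_unterminated_string : Prop := ∀ (json_str : String), Dom_has_unterminated_string json_str → Spec_has_unterminated_string json_str (has_unterminated_string json_str)

-- ===== LEMMAS AND PROOFS =====

-- Chars.count with a single-character pattern is List.count
theorem hus_count_go_singleton (c : Char) (fuel : Nat) (l : List Char) (acc : Nat) (h : l.length ≤ fuel) :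
    PySem.Chars.count.go [c] fuel l acc = acc + l.count c := by
  induction fuel generalizing l acc with
  | zero => cases l with
    | nil => simp [PySem.Chars.count.go]
    | cons a t => simp at h
  | succ n ih =>
    cases l with
    | nil => simp [PySem.Chars.count.go]
    | cons a t =>
      simp only [PySem.Chars.count.go]
      by_cases hac : a = c
      · subst hac
        simp [List.isPrefixOf, ih t _ (by simpa using h)]
        omega
      · simp [List.isPrefixOf, hac, List.count_cons, ih t _ (by simpa using h), Ne.symm hac]

theorem hus_count_singleton (l : List Char) (c : Char) :
    PySem.Chars.count l [c] = l.count c := by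
  simp [PySem.Chars.count, hus_count_go_singleton c l.length l 0 le_rfl]

-- one step of List.splitOn on a backslash separator
theorem hus_splitOn_cons (c : Char) (l : List Char) :
    List.splitOn '\\' (c :: l) =
      if c = '\\' then [] :: List.splitOn '\\' l
      else List.modifyHead (c :: ·) (List.splitOn '\\' l) := by
  simp [List.splitOn, List.splitOnP_cons]

theorem hus_sp_ne (l : List Char) : List.splitOn '\\' l ≠ [] := by
  simp only [List.splitOn]; exact List.splitOnP_ne_nil _ _

-- unfolding equations for hus_segLoop
theorem hus_segLoop_nil : hus_segLoop [] = 0 := rfl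
theorem hus_segLoop_cons_cons (a : Char) (h : List Char) (t : List (List Char)) :
    hus_segLoop ((a :: h) :: t) =
      (PySem.Chars.count (PySem.List.slice (a :: h) (some 1) none) ['"'] : Int) + hus_segLoop t := by
  rw [hus_segLoop.eq_def]; simp
theorem hus_segLoop_nil_nil : hus_segLoop [[]] = 0 := by rw [hus_segLoop.eq_def]; simp
theorem hus_segLoop_nil_cons (nxt : List Char) (t : List (List Char)) :
    hus_segLoop ([] :: nxt :: t) = (PySem.Chars.count nxt ['"'] : Int) + hus_segLoop t := by
  rw [hus_segLoop.eq_def]; simp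

theorem hus_slice1 (a : Char) (h : List Char) : PySem.List.slice (a :: h) (some 1) none = h := by
  simp [PySem.List.slice_from]

-- proof-only reference: the string with every backslash+next-char pair removed
def hus_strip : List Char → List Char
  | [] => []
  | [c] => if c = '\\' then [] else [c]
  | c :: d :: rest => if c = '\\' then hus_strip rest else c :: hus_strip (d :: rest)

-- A's loop counts the quotes surviving escape-stripping
theorem hus_loopA_strip (l : List Char) (count : Int) :
    hus_loopA l count false = count + PySem.List.count (hus_strip l) '"' := by
  induction l using hus_strip.induct generalizing count with
  | _ =>
    simp_all [hus_loopA, hus_strip, PySem.List.count, List.count_cons]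
    try split_ifs <;> simp_all <;> omega

-- B's split-and-sum also counts the quotes surviving escape-stripping
theorem hus_B_eq_strip (l : List Char) :
    (match List.splitOn '\\' l with
     | [] => (0 : Int)
     | p0 :: rest => (PySem.Chars.count p0 ['"'] : Int) + hus_segLoop rest)
      = ((hus_strip l).count '"' : Int) := by
  induction l using hus_strip.induct with
  | case1 => simp [hus_strip, hus_segLoop_nil, hus_count_singleton]
  | case2 => simp [hus_strip, hus_splitOn_cons, hus_segLoop_nil_nil, hus_count_singleton]
  | case3 c hc => simp [hus_strip, hus_splitOn_cons, hc, hus_segLoop_nil, hus_count_singleton]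
  | case4 d rest ih =>
    obtain ⟨h, t, hs⟩ : ∃ h t, List.splitOn '\\' rest = h :: t := by
      rcases e : List.splitOn '\\' rest with _ | ⟨h, t⟩
      · exact absurd e (hus_sp_ne _)
      · exact ⟨h, t, rfl⟩
    rw [hs] at ih; simp only at ih
    by_cases hd : d = '\\'
    · subst hd
      simp [hus_splitOn_cons, hs, hus_strip, hus_segLoop_nil_cons,
        hus_count_singleton] at ih ⊢
      omega
    · simp [hus_splitOn_cons, hd, hs, hus_strip,
        hus_segLoop_cons_cons, hus_slice1, hus_count_singleton] at ih ⊢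
      omega
  | case5 c d rest hc ih =>
    obtain ⟨h, t, hs⟩ : ∃ h t, List.splitOn '\\' (d :: rest) = h :: t := by
      rcases e : List.splitOn '\\' (d :: rest) with _ | ⟨h, t⟩
      · exact absurd e (hus_sp_ne _)
      · exact ⟨h, t, rfl⟩
    rw [hs] at ih; simp only at ih
    simp [hus_splitOn_cons, hc, hs, hus_strip,
      hus_count_singleton, List.count_cons] at ih ⊢
    split_ifs <;> linarith [ih]

-- ===== VERDICT =====
theorem has_unterminated_string_spec : Claim_equal_has_unterminated_string := by
  intro s _
  unfold Spec_has_unterminated_string has_unterminated_string has_unterminated_string_alt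
  have hB := hus_B_eq_strip s.toList
  rw [hus_loopA_strip]
  rcases h : List.splitOn '\\' s.toList with _ | ⟨p0, rest⟩
  · exact absurd h (hus_sp_ne s.toList)
  · rw [h] at hB
    simp only at hB
    simp [PySem.List.count, ← hB]
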